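-- pv_equiv track=rewrite | github.com/PhoenixIIexe/predprofit | task5.py | error_by_date
-- ===== SOURCE A (Python) =====
-- from typing import List, Dict, Tuple
--
-- def error_by_date(table: List[List[str]]) -> Dict[str, List[Tuple[str]]]:
--     """
--     Группировка ошибок по дате
--
--     table - данные таблицы
--     """
--
--     res = {}
--     for row in table:
--         *_, name_error, date = row
--         if date not in res:
--             res[date] = []
--         res[date].append(name_error)
--
--     return res
-- ===== SOURCE B (Python) =====
-- def error_by_date(table):
--     """
--     Группировка ошибок по дате — two-pass: dedupe the dates in first-occurrence
--     order, then build each group with one filtering comprehension.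
--     """
--     dates = dict.fromkeys(row[-1] for row in table)
--     return {d: [row[-2] for row in table if row[-1] == d] for d in dates}
-- ===== Notes on version B (the rewrite author's own statement) =====
-- stated objective: idiomatic
-- what changed: Replaced the single-pass dict-building loop (insert-empty-then-append per row) by a two-pass form: dedupe the dates in first-occurrence order with dict.fromkeys, then build each date's group by a filtering comprehension over the whole table.
import Mathlib
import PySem

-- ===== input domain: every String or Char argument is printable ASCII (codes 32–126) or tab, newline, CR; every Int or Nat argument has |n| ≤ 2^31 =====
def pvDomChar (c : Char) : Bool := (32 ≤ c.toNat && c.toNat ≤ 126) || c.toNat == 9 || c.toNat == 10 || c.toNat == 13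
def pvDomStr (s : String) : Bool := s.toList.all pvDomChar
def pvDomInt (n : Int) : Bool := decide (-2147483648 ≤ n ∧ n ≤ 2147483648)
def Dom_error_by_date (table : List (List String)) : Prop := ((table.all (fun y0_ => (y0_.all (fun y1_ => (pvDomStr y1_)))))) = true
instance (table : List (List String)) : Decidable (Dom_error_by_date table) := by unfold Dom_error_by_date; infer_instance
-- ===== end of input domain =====

-- B dedupes the dates first and builds each group by one filtering pass (idiomatic two-pass form of the same grouping).
-- ===== PORT A =====
def error_by_date (table : List (List String)) : List (String × List String) :=
  (table.foldl (fun res row =>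
      let name_error := (PySem.List.pyGet? row (-2)).getD ""
      let date := (PySem.List.pyGet? row (-1)).getD ""
      let res := if res.contains date then res else res.insert date []
      res.modify date [] (fun l => l ++ [name_error]))
    PySem.Dict.empty).items

-- ===== PORT B =====
def error_by_date_alt (table : List (List String)) : List (String × List String) :=
  let dates := PySem.List.dedup (table.map (fun row => (PySem.List.pyGet? row (-1)).getD ""))
  dates.map (fun d => (d,
    (table.filter (fun row => (PySem.List.pyGet? row (-1)).getD "" == d)).map
      (fun row => (PySem.List.pyGet? row (-2)).getD "")))

-- ===== PRECONDITION & SPEC =====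
-- Pre_ excludes rows with fewer than two elements: there Python A raises ValueError (unpacking) and B raises IndexError.
def Pre_error_by_date (table : List (List String)) : Prop := ∀ row ∈ table, 2 ≤ row.length
instance (table : List (List String)) : Decidable (Pre_error_by_date table) := by unfold Pre_error_by_date; infer_instance
def pvWitness_error_by_date : List (List String) := [["e1", "d1"], ["x", "e2", "d1"], ["e3", "d2"]]
def Spec_error_by_date (table : List (List String)) (out : List (String × List String)) : Prop := out = error_by_date_alt table
instance (table : List (List String)) (out : List (String × List String)) : Decidable (Spec_error_by_date table out) := by unfold Spec_error_by_date; infer_instance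

-- ===== CLAIM (what is proved, stated in full; the proofs are below) =====
def Claim_equal_error_by_date : Prop := ∀ (table : List (List String)), Dom_error_by_date table → Pre_error_by_date table → Spec_error_by_date table (error_by_date table)

-- ===== LEMMAS AND PROOFS =====

-- A's two-step body (insert [] when missing, then append) is exactly Dict.modify with default [].
theorem pv_body_eq (d : PySem.Dict String (List String)) (k n : String) :
    (if d.contains k then d else d.insert k []).modify k [] (fun l => l ++ [n]) =
      d.modify k [] (fun l => l ++ [n]) := by
  by_cases h : d.contains k
  · simp [h]
  · simp only [Bool.not_eq_true] at h
    rw [if_neg (by simp [h])]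
    unfold PySem.Dict.modify
    rw [PySem.Dict.insert_insert_self, PySem.Dict.getD_insert_self,
      PySem.Dict.getD_of_not_contains (h := h)]

-- ===== VERDICT (by name: the statement is the Claim_ definition above) =====
theorem error_by_date_spec : Claim_equal_error_by_date := by
  intro table _ _
  unfold Spec_error_by_date
  unfold error_by_date error_by_date_alt
  have hfold : ∀ (t : List (List String)),
      t.foldl (fun res row =>
        let name_error := (PySem.List.pyGet? row (-2)).getD ""
        let date := (PySem.List.pyGet? row (-1)).getD ""
        let res := if res.contains date then res else res.insert date []
        res.modify date [] (fun l => l ++ [name_error])) PySem.Dict.empty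
      = (t.map (fun row => ((PySem.List.pyGet? row (-1)).getD "", (PySem.List.pyGet? row (-2)).getD ""))).foldl
          (fun d p => d.modify p.1 [] (fun l => l ++ [p.2])) PySem.Dict.empty := by
    intro t
    rw [List.foldl_map]
    apply PySem.List.foldl_congr_mem
    intro d row _
    exact pv_body_eq d _ _
  rw [hfold]
  set pf : List String → String × String :=
    fun row => ((PySem.List.pyGet? row (-1)).getD "", (PySem.List.pyGet? row (-2)).getD "") with hpf
  have hnd : ((table.map pf).foldl (fun d p => d.modify p.1 [] (fun l => l ++ [p.2]))
      PySem.Dict.empty).keys.Nodup :=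
    PySem.Dict.nodup_keys_foldl_modify_key _ _ _ _ _ PySem.Dict.nodup_keys_empty
  rw [PySem.Dict.items_eq_map_keys _ hnd []]
  rw [PySem.Dict.keys_foldl_modify_key]
  simp only [PySem.Dict.keys_empty, PySem.Dict.getD_foldl_modify_append, PySem.Dict.getD_empty,
    List.nil_append]
  have hkeys : PySem.Set.update [] ((table.map pf).map Prod.fst)
      = PySem.List.dedup (table.map (fun row => (PySem.List.pyGet? row (-1)).getD "")) := by
    simp [PySem.Set.update, PySem.List.dedup_eq_ofList, PySem.Set.ofList_eq_foldl,
      List.map_map, hpf, Function.comp_def]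
  rw [hkeys]
  apply List.map_congr_left
  intro d _
  simp only [List.filter_map, List.map_map, hpf, Function.comp_def]
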